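/- GENERATED by tools/from_farm_form.py from farm/worked/clamp_length/Proof.lean (a worked proof of the farm's unit `clamp_length`,
   accepted by the verdict) — do not edit. -/
import Toy.Spec.Units.clamp_length
open X86 X86.User Asan ProgX.Base

set_option maxRecDepth 4000
set_option maxHeartbeats 4000000

namespace Toy.Spec.Proved.clamp_length
open Toy.Spec.clamp_length (Statement)

/-- A register whose sign bit is clear, read as a signed number, is its unsigned value
(what `js` / `jg` at 0x105183 / 0x105189 compare). -/
theorem clamp_toInt_of_msb_false_w (x : Word) (h : x.toBitVec.msb = false) : x.toBitVec.toInt = (x.toNat : Int) := by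
  rw [BitVec.toInt_eq_msb_cond, h]
  simp only [Bool.false_eq_true, if_false, UInt64.toNat_toBitVec]

/-- A register whose sign bit is clear is below 2^63. -/
theorem clamp_lt_of_msb_false_w (x : Word) (h : x.toBitVec.msb = false) : x.toNat < 2 ^ 63 := by
  rw [BitVec.msb_eq_decide] at h
  simp only [decide_eq_false_iff_not, UInt64.toNat_toBitVec] at h
  omega

/-- A register whose sign bit is set is at least 2^63. -/
theorem clamp_ge_of_msb_true_w (x : Word) (h : x.toBitVec.msb = true) : 2 ^ 63 ≤ x.toNat := by
  rw [BitVec.msb_eq_decide] at h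
  simp only [decide_eq_true_eq, UInt64.toNat_toBitVec] at h
  omega

end Toy.Spec.Proved.clamp_length

/-- `clamp_length` satisfies its contract: three `ret` paths, no memory access but the `ret`'s. -/
theorem Toy.Spec.Proved.clamp_length_ok : Toy.Spec.clamp_length.Statement := by
  intro Lay hLay μ hμ u₀ hcode others frames u ret he hpre
  v_entry he
  u_walk hcode [hμ.vendor] span [ProgX.Base.L.textLo, ProgX.Base.L.textHi] side (v_side)
  · -- 0x10518f: len < 0 (toy.c:29): `mov eax, 0 ; ret`
    refine ReachVia.done ?_
    v_returned
    have hge := Toy.Spec.Proved.clamp_length.clamp_ge_of_msb_true_w _ hbr_105183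
    refine ⟨?_, ?_, ?_⟩
    · rw [w_rax, toNat_ofBV32]
      decide
    · intro hlt
      omega
    · rw [w_mem]
      exact Mem.EqOn.refl _ _ _
  · -- 0x105195: len > 64 (toy.c:32): `mov eax, 64 ; ret`
    refine ReachVia.done ?_
    v_returned
    have hint := Toy.Spec.Proved.clamp_length.clamp_toInt_of_msb_false_w _ hbr_105183
    rw [hint] at hbr_105189
    have h64 : (64#64).toInt = 64 := by decide
    rw [h64] at hbr_105189
    refine ⟨?_, ?_, ?_⟩
    · rw [w_rax, toNat_ofBV32]
      decide
    · intro hlt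
      rw [w_rax, toNat_ofBV32]
      have e : (64#32).toNat = 64 := by decide
      rw [e]
      omega
    · rw [w_mem]
      exact Mem.EqOn.refl _ _ _
  · -- 0x10518b: 0 ≤ len ≤ 64 (toy.c:34): `mov rax, rdi ; ret`
    refine ReachVia.done ?_
    v_returned
    have hint := Toy.Spec.Proved.clamp_length.clamp_toInt_of_msb_false_w _ hbr_105183
    rw [hint] at hbr_105189
    have h64 : (64#64).toInt = 64 := by decide
    rw [h64] at hbr_105189
    refine ⟨?_, ?_, ?_⟩
    · rw [w_rax]
      omega
    · intro hlt
      rw [w_rax]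
      exact Nat.le_refl _
    · rw [w_mem]
      exact Mem.EqOn.refl _ _ _
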